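-- pv_equiv track=rewrite | github.com/UGA6/Rahmatullah-doctor-list-work- | chatbot/chatbot_logic.py | map_symptoms_to_specialization
-- ===== SOURCE A (Python) =====
-- from typing import Dict, List, Optional, Tuple, Any
--
-- def map_symptoms_to_specialization(symptoms: List[str]) -> Optional[str]:
--     """
--     Map extracted symptoms to appropriate medical specialization
--
--     Args:
--         symptoms: List of extracted symptoms
--
--     Returns:
--         Medical specialization string
--     """
--     if not symptoms:
--         return None
--
--     # Map symptoms to specializations
--     symptom_to_specialization = {
--         "fever": "General Physician",
--         "headache": "Neurologist",
--         "chest pain": "Cardiologist",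
--         "breathing difficulty": "Pulmonologist",
--         "cough": "Pulmonologist",
--         "skin rash": "Dermatologist",
--         "stomach pain": "Gastroenterologist",
--         "vomiting": "Gastroenterologist",
--         "diarrhea": "Gastroenterologist",
--         "eye problem": "Ophthalmologist",
--         "ear problem": "ENT Specialist",
--         "throat problem": "ENT Specialist",
--         "dizziness": "Neurologist",
--         "fatigue": "General Physician",
--         "nausea": "General Physician",
--         "back pain": "Orthopedic",
--         "toothache": "Dentist",
--         "pregnancy": "Gynecologist",
--         "mental health": "Psychiatrist",
--         "high blood pressure": "Cardiologist",
--         "diabetes": "General Physician",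
--         "weight loss": "General Physician",
--         "insomnia": "Psychiatrist",
--         "body pain": "General Physician",
--     }
--
--     # Get specializations for all symptoms
--     specializations = []
--     for symptom in symptoms:
--         if symptom in symptom_to_specialization:
--             specializations.append(symptom_to_specialization[symptom])
--
--     # Return most relevant (first one or most common)
--     if specializations:
--         # Prioritize General Physician for general symptoms
--         if "General Physician" in specializations and len(specializations) > 1:
--             specializations.remove("General Physician")
--         return specializations[0] if specializations else "General Physician"
--
--     return "General Physician"  # Default
-- ===== SOURCE B (Python) =====
-- _SPEC_TABLE = {
--     "fever": "General Physician",
--     "headache": "Neurologist",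
--     "chest pain": "Cardiologist",
--     "breathing difficulty": "Pulmonologist",
--     "cough": "Pulmonologist",
--     "skin rash": "Dermatologist",
--     "stomach pain": "Gastroenterologist",
--     "vomiting": "Gastroenterologist",
--     "diarrhea": "Gastroenterologist",
--     "eye problem": "Ophthalmologist",
--     "ear problem": "ENT Specialist",
--     "throat problem": "ENT Specialist",
--     "dizziness": "Neurologist",
--     "fatigue": "General Physician",
--     "nausea": "General Physician",
--     "back pain": "Orthopedic",
--     "toothache": "Dentist",
--     "pregnancy": "Gynecologist",
--     "mental health": "Psychiatrist",
--     "high blood pressure": "Cardiologist",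
--     "diabetes": "General Physician",
--     "weight loss": "General Physician",
--     "insomnia": "Psychiatrist",
--     "body pain": "General Physician",
-- }
--
--
-- def map_symptoms_to_specialization(symptoms):
--     """Single pass keeping only the first two matched specializations;
--     stops as soon as two are found instead of building a list."""
--     if not symptoms:
--         return None
--     first = second = None
--     for symptom in symptoms:
--         spec = _SPEC_TABLE.get(symptom)
--         if spec is None:
--             continue
--         if first is None:
--             first = spec
--         else:
--             second = spec
--             break
--     if first is None:
--         return "General Physician"
--     if first == "General Physician" and second is not None:
--         return second
--     return first
-- ===== Notes on version B (the rewrite author's own statement) =====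
-- stated objective: simpler
-- what changed: B makes one early-exiting pass keeping just the first two matched specializations as scalars, instead of building a full list of matches and patching it with 'in'/len/remove before indexing.
import Mathlib
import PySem

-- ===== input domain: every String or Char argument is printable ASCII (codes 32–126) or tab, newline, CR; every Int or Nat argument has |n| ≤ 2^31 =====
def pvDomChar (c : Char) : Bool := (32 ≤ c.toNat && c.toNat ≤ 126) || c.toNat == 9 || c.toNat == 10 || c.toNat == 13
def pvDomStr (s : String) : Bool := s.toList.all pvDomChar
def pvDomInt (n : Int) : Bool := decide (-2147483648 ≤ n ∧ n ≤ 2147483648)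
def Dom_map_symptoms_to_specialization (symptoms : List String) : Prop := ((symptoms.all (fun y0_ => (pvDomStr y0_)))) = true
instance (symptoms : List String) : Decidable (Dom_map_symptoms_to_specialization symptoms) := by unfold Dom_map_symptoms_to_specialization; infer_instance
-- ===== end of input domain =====

-- B replaces A's build-a-list / membership-test / remove / index dance by one early-exiting
-- pass that keeps only the first two matched specializations as scalars (objective: simpler).

def specTable : PySem.Dict String String := PySem.Dict.ofList [
  ("fever", "General Physician"),
  ("headache", "Neurologist"),
  ("chest pain", "Cardiologist"),
  ("breathing difficulty", "Pulmonologist"),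
  ("cough", "Pulmonologist"),
  ("skin rash", "Dermatologist"),
  ("stomach pain", "Gastroenterologist"),
  ("vomiting", "Gastroenterologist"),
  ("diarrhea", "Gastroenterologist"),
  ("eye problem", "Ophthalmologist"),
  ("ear problem", "ENT Specialist"),
  ("throat problem", "ENT Specialist"),
  ("dizziness", "Neurologist"),
  ("fatigue", "General Physician"),
  ("nausea", "General Physician"),
  ("back pain", "Orthopedic"),
  ("toothache", "Dentist"),
  ("pregnancy", "Gynecologist"),
  ("mental health", "Psychiatrist"),
  ("high blood pressure", "Cardiologist"),
  ("diabetes", "General Physician"),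
  ("weight loss", "General Physician"),
  ("insomnia", "Psychiatrist"),
  ("body pain", "General Physician")]

-- ===== PORT A =====
def map_symptoms_to_specialization (symptoms : List String) : Option String :=
  if symptoms = [] then none
  else
    -- for symptom in symptoms: if symptom in dict: specializations.append(dict[symptom])
    let specializations := symptoms.foldl (fun acc s =>
      match specTable.get? s with
      | some v => acc ++ [v]
      | none => acc) []
    if specializations ≠ [] then
      let specializations :=
        if "General Physician" ∈ specializations ∧ specializations.length > 1 then
          -- list.remove: cannot fail here, membership was just checked
          (PySem.List.remove? specializations "General Physician").getD specializations
        else specializations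
      match specializations with
      | x :: _ => some x
      | [] => some "General Physician"
    else some "General Physician"

-- ===== PORT B =====
-- B's loop: first/second scalars, break as soon as the second match is found
def altLoop (first : Option String) : List String → Option String × Option String
  | [] => (first, none)
  | s :: rest =>
    match specTable.get? s with
    | none => altLoop first rest
    | some v =>
      match first with
      | none => altLoop (some v) rest
      | some f => (some f, some v)   -- break

def map_symptoms_to_specialization_alt (symptoms : List String) : Option String :=
  if symptoms = [] then none
  else
    match altLoop none symptoms with
    | (none, _) => some "General Physician"
    | (some f, second) =>
      if f = "General Physician" ∧ second ≠ none then second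
      else some f

-- ===== PRECONDITION & SPEC =====
def Spec_map_symptoms_to_specialization (symptoms : List String) (out : Option String) : Prop := out = map_symptoms_to_specialization_alt symptoms
instance (symptoms : List String) (out : Option String) : Decidable (Spec_map_symptoms_to_specialization symptoms out) := by unfold Spec_map_symptoms_to_specialization; infer_instance

-- ===== CLAIM (what is proved, stated in full; the proofs are below) =====
def Claim_equal_map_symptoms_to_specialization : Prop := ∀ (symptoms : List String), Dom_map_symptoms_to_specialization symptoms → Spec_map_symptoms_to_specialization symptoms (map_symptoms_to_specialization symptoms)

-- ===== LEMMAS AND PROOFS =====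

/-- The list of matched specializations, as A collects it. -/
def matchesOf (xs : List String) : List String := xs.filterMap (fun s => specTable.get? s)

theorem foldl_eq_matchesOf (xs : List String) (acc : List String) :
    xs.foldl (fun acc s =>
      match specTable.get? s with
      | some v => acc ++ [v]
      | none => acc) acc = acc ++ matchesOf xs := by
  induction xs generalizing acc with
  | nil => simp [matchesOf]
  | cons s rest ih =>
    simp only [List.foldl_cons, matchesOf, List.filterMap_cons]
    cases h : specTable.get? s with
    | none => simpa [h, matchesOf] using ih acc
    | some v => simpa [h, matchesOf] using ih (acc ++ [v])

theorem altLoop_some (f : String) (xs : List String) :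
    altLoop (some f) xs = (some f, (matchesOf xs).head?) := by
  induction xs with
  | nil => simp [altLoop, matchesOf]
  | cons s rest ih =>
    simp only [altLoop, matchesOf, List.filterMap_cons]
    cases h : specTable.get? s with
    | none => simpa [matchesOf] using ih
    | some v => simp

theorem altLoop_none (xs : List String) :
    altLoop none xs = ((matchesOf xs).head?, ((matchesOf xs).drop 1).head?) := by
  induction xs with
  | nil => simp [altLoop, matchesOf]
  | cons s rest ih =>
    simp only [altLoop, matchesOf, List.filterMap_cons]
    cases h : specTable.get? s with
    | none => simpa [matchesOf] using ih
    | some v => simpa [matchesOf] using altLoop_some v rest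

-- ===== VERDICT (by name: the statement is the Claim_ definition above) =====
theorem map_symptoms_to_specialization_spec : Claim_equal_map_symptoms_to_specialization := by
  intro symptoms _
  unfold Spec_map_symptoms_to_specialization
  unfold map_symptoms_to_specialization map_symptoms_to_specialization_alt
  by_cases hs : symptoms = []
  · simp [hs]
  · simp only [if_neg hs]
    rw [foldl_eq_matchesOf, altLoop_none, List.nil_append]
    cases hm : matchesOf symptoms with
    | nil => simp
    | cons a rest =>
      cases rest with
      | nil => simp
      | cons b rest' =>
        by_cases ha : a = "General Physician"
        · subst ha
          simp [PySem.List.remove?_cons_self]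
        · by_cases hb : "General Physician" ∈ b :: rest'
          · have h1 : PySem.List.remove? (a :: b :: rest') "General Physician" =
                some (a :: (b :: rest').erase "General Physician") := by
              rw [PySem.List.remove?_cons_of_ne _ ha,
                PySem.List.remove?_eq_some_erase _ _ hb]
              rfl
            simp [ha, hb, h1, Ne.symm ha]
          · simp [ha, hb, Ne.symm ha]
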